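-- pv_equiv track=rewrite | github.com/tauhidatoul/HIT137-Assignment-2 | Assignment-2_Question_2/Q2P2.py | separate_and_convert
-- ===== SOURCE A (Python) =====
-- def separate_and_convert(s):
--     # Separate numbers and letters
--     number_string = ''.join([char for char in s if char.isdigit()])
--     letter_string = ''.join([char for char in s if char.isalpha()])
--
--     # Convert even numbers to ASCII Code Decimal Values
--     even_numbers = [int(num) for num in number_string if int(num) % 2 == 0]
--     ascii_values_even_numbers = [ord(str(num)) for num in even_numbers]
--
--     # Convert upper-case letters to ASCII Code Decimal Values
--     upper_case_letters = [char for char in letter_string if char.isupper()]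
--     ascii_values_upper_case_letters = [ord(char) for char in upper_case_letters]
--
--     return ''.join(map(str, number_string)),''.join(map(str, letter_string)),''.join(map(str, even_numbers)), ''.join(map(str, upper_case_letters)), ascii_values_even_numbers, ascii_values_upper_case_letters
-- ===== SOURCE B (Python) =====
-- def separate_and_convert(s):
--     digits = []
--     letters = []
--     even_numbers = []
--     ascii_even = []
--     uppers = []
--     ascii_upper = []
--     for ch in s:
--         if ch.isdigit():
--             digits.append(ch)
--             num = int(ch)
--             if num % 2 == 0:
--                 even_numbers.append(num)
--                 ascii_even.append(ord(str(num)))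
--         elif ch.isalpha():
--             letters.append(ch)
--             if ch.isupper():
--                 uppers.append(ch)
--                 ascii_upper.append(ord(ch))
--     return (''.join(digits), ''.join(letters),
--             ''.join(map(str, even_numbers)), ''.join(uppers),
--             ascii_even, ascii_upper)
-- ===== Notes on version B (the rewrite author's own statement) =====
-- stated objective: faster
-- what changed: Replaces five separate comprehension passes over the string with one loop that classifies each character once and builds all six results together.
import Mathlib
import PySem

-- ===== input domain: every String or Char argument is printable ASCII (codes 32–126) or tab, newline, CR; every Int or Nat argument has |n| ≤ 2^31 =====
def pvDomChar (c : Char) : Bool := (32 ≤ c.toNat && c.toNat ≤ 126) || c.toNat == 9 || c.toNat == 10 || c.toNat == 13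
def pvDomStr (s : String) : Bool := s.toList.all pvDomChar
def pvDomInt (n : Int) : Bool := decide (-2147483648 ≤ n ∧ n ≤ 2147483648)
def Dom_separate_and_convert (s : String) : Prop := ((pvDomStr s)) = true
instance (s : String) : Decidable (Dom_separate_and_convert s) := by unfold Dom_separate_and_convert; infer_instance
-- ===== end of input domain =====

-- B replaces A's five separate comprehension passes by one loop that classifies each
-- character once and builds all six results together (objective: simpler/single pass).

-- ord(t): exact for strings of length 1 (the only case either program reaches;
-- Python's ord raises TypeError otherwise)
def pvOrd (t : List Char) : Int :=
  match t with
  | [c] => (c.toNat : Int)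
  | _   => 0

-- int(char): int() of a one-character string; it is `some` for every character
-- these programs apply it to (ASCII digits), so the default is never reached
def pvInt (c : Char) : Int := (PySem.Int.ofChars? [c]).getD 0

-- ===== PORT A =====
def separate_and_convert (s : String) : String × String × String × String × List Int × List Int :=
  let number_string : List Char := s.toList.filter PySem.Chars.isdigit
  let letter_string : List Char := s.toList.filter PySem.Chars.isalpha
  let even_numbers : List Int :=
    (number_string.filter (fun c => PySem.Int.mod (pvInt c) 2 == 0)).map pvInt
  let ascii_values_even_numbers : List Int :=
    even_numbers.map (fun n => pvOrd (PySem.Int.toStr n).toList)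
  let upper_case_letters : List Char := letter_string.filter PySem.Chars.isupper
  let ascii_values_upper_case_letters : List Int :=
    upper_case_letters.map (fun c => (c.toNat : Int))
  (PySem.Str.join "" (number_string.map (fun c => String.ofList [c])),
   PySem.Str.join "" (letter_string.map (fun c => String.ofList [c])),
   PySem.Str.join "" (even_numbers.map PySem.Int.toStr),
   PySem.Str.join "" (upper_case_letters.map (fun c => String.ofList [c])),
   ascii_values_even_numbers, ascii_values_upper_case_letters)

-- ===== PORT B =====
-- one step of B's single loop; state = (digits, letters, evens, ascii_even, uppers, ascii_upper)
def pvStep (acc : List Char × List Char × List Int × List Int × List Char × List Int)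
    (c : Char) : List Char × List Char × List Int × List Int × List Char × List Int :=
  let (ds, ls, ev, ae, up, au) := acc
  if PySem.Chars.isdigit c then
    let n := pvInt c
    if PySem.Int.mod n 2 == 0 then
      (ds ++ [c], ls, ev ++ [n], ae ++ [pvOrd (PySem.Int.toStr n).toList], up, au)
    else (ds ++ [c], ls, ev, ae, up, au)
  else if PySem.Chars.isalpha c then
    if PySem.Chars.isupper c then
      (ds, ls ++ [c], ev, ae, up ++ [c], au ++ [(c.toNat : Int)])
    else (ds, ls ++ [c], ev, ae, up, au)
  else acc

def separate_and_convert_alt (s : String) : String × String × String × String × List Int × List Int :=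
  let r := s.toList.foldl pvStep ([], [], [], [], [], [])
  (String.ofList r.1, String.ofList r.2.1,
   PySem.Str.join "" (r.2.2.1.map PySem.Int.toStr),
   String.ofList r.2.2.2.2.1, r.2.2.2.1, r.2.2.2.2.2)

-- ===== PRECONDITION & SPEC =====
def Spec_separate_and_convert (s : String) (out : String × String × String × String × List Int × List Int) : Prop := out = separate_and_convert_alt s
instance (s : String) (out : String × String × String × String × List Int × List Int) : Decidable (Spec_separate_and_convert s out) := by unfold Spec_separate_and_convert; infer_instance

-- ===== CLAIM (what is proved, stated in full; the proofs are below) =====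
def Claim_equal_separate_and_convert : Prop := ∀ (s : String), Dom_separate_and_convert s → Spec_separate_and_convert s (separate_and_convert s)

-- ===== LEMMAS AND PROOFS =====

lemma pv_digit_not_alpha (c : Char) (h : PySem.Chars.isdigit c = true) :
    PySem.Chars.isalpha c = false := by
  simp [PySem.Chars.isdigit, PySem.Chars.isalpha, PySem.Chars.isupper,
        PySem.Chars.islower, Char.le_def, UInt32.le_iff_toNat_le] at h ⊢
  constructor <;> intro h1 <;> omega

lemma pv_fold_spec (cs : List Char) (ds ls up : List Char) (ev ae au : List Int) :
    cs.foldl pvStep (ds, ls, ev, ae, up, au) =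
      (ds ++ cs.filter PySem.Chars.isdigit,
       ls ++ cs.filter PySem.Chars.isalpha,
       ev ++ (((cs.filter PySem.Chars.isdigit).filter
                (fun c => PySem.Int.mod (pvInt c) 2 == 0)).map pvInt),
       ae ++ ((((cs.filter PySem.Chars.isdigit).filter
                (fun c => PySem.Int.mod (pvInt c) 2 == 0)).map pvInt).map
                (fun n => pvOrd (PySem.Int.toStr n).toList)),
       up ++ ((cs.filter PySem.Chars.isalpha).filter PySem.Chars.isupper),
       au ++ (((cs.filter PySem.Chars.isalpha).filter PySem.Chars.isupper).map
                (fun c => (c.toNat : Int)))) := by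
  induction cs generalizing ds ls ev ae up au with
  | nil => simp
  | cons c cs ih =>
    by_cases hd : PySem.Chars.isdigit c = true
    · have ha := pv_digit_not_alpha c hd
      by_cases he : (2 : Int) ∣ pvInt c
      · have he' : (PySem.Int.mod (pvInt c) 2 == 0) = true := by
          simpa [beq_iff_eq, PySem.Int.mod_eq_zero_iff_dvd] using he
        simp [List.foldl_cons, pvStep, hd, ha, he, ih]
      · have he' : (PySem.Int.mod (pvInt c) 2 == 0) = false := by
          simpa [beq_iff_eq, PySem.Int.mod_eq_zero_iff_dvd] using he
        simp [List.foldl_cons, pvStep, hd, ha, he, ih]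
    · by_cases ha : PySem.Chars.isalpha c = true
      · by_cases hu : PySem.Chars.isupper c = true
        · simp [List.foldl_cons, pvStep, hd, ha, hu, ih]
        · simp [List.foldl_cons, pvStep, hd, ha, hu, ih]
      · simp [List.foldl_cons, pvStep, hd, ha, ih]

lemma pv_join_singletons (cs : List Char) :
    PySem.Str.join "" (cs.map (fun c => String.ofList [c])) = String.ofList cs := by
  simp only [PySem.Str.join, List.map_map]
  have h : (String.toList ∘ fun c => String.ofList [c]) = fun c => [c] := funext fun c => by simp
  rw [h]
  simp [PySem.Chars.join_nil_singletons]

-- ===== VERDICT (by name: the statement is the Claim_ definition above) =====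
theorem separate_and_convert_spec : Claim_equal_separate_and_convert := by
  intro s _
  unfold Spec_separate_and_convert separate_and_convert separate_and_convert_alt
  rw [pv_fold_spec]
  simp [pv_join_singletons]
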